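-- pv_equiv track=rewrite | github.com/breandan81/lcars-home-assistant | arduino/rf_analyze.py | split_frames
-- ===== SOURCE A (Python) =====
-- def split_frames(pulses, sync_threshold):
--     """
--     Split at sync pulses. Returns list of (sync_pulse, data_pulses) tuples.
--     sync_pulse is the gap that preceded this frame (0 for the first).
--     """
--     frames = []
--     current = []
--     last_sync = 0
--     for p in pulses:
--         if p >= sync_threshold:
--             if len(current) >= 6:
--                 frames.append((last_sync, current))
--             current = []
--             last_sync = p
--         else:
--             current.append(p)
--     if len(current) >= 6:
--         frames.append((last_sync, current))
--     return frames
-- ===== SOURCE B (Python) =====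
-- def split_frames(pulses, sync_threshold):
--     """
--     Split at sync pulses. Returns list of (sync_pulse, data_pulses) tuples.
--     sync_pulse is the gap that preceded this frame (0 for the first).
--     """
--     frames = []
--     last_sync = 0
--     i, n = 0, len(pulses)
--     while i < n:
--         is_sync = pulses[i] >= sync_threshold
--         j = i + 1
--         while j < n and (pulses[j] >= sync_threshold) == is_sync:
--             j += 1
--         if is_sync:
--             last_sync = pulses[j - 1]
--         else:
--             run = pulses[i:j]
--             if len(run) >= 6:
--                 frames.append((last_sync, run))
--         i = j
--     return frames
-- ===== Notes on version B (the rewrite author's own statement) =====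
-- stated objective: alternative
-- what changed: B traverses the pulse list run by run (an inner boundary scan finds each maximal run of same sync-classification, taken whole by slicing), instead of A's element-by-element loop with a pending 'current' accumulator and a duplicated end-of-loop flush.
import Mathlib
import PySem

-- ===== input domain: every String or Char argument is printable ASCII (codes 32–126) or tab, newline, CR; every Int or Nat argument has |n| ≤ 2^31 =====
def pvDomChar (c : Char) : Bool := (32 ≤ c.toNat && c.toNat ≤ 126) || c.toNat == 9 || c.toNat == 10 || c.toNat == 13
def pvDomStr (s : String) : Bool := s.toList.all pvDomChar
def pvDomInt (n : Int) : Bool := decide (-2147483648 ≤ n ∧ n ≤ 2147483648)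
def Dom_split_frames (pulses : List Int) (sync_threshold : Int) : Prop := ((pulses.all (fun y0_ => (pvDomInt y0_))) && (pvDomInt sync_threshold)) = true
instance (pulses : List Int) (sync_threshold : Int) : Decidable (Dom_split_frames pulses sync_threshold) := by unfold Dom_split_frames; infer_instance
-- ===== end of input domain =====

-- B splits the list into maximal runs of same sync-classification and handles each run whole; equal return value proved, no side effects involved.

-- ===== PORT A =====
-- A's for-loop over the state (frames, current, last_sync), then the final flush.
def split_frames_stepA (sync_threshold : Int)
    (st : List (Int × List Int) × List Int × Int) (p : Int) :
    List (Int × List Int) × List Int × Int :=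
  if p ≥ sync_threshold then
    ((if st.2.1.length ≥ 6 then st.1 ++ [(st.2.2, st.2.1)] else st.1), [], p)
  else
    (st.1, st.2.1 ++ [p], st.2.2)

def split_frames (pulses : List Int) (sync_threshold : Int) : List (Int × List Int) :=
  let st := pulses.foldl (split_frames_stepA sync_threshold) ([], [], 0)
  if st.2.1.length ≥ 6 then st.1 ++ [(st.2.2, st.2.1)] else st.1

-- ===== PORT B =====
-- B's outer while loop: each step consumes one maximal run (the inner while = takeWhile/dropWhile).
def split_frames_altAux (sync_threshold : Int) (ps : List Int) (last_sync : Int)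
    (frames : List (Int × List Int)) : List (Int × List Int) :=
  match ps with
  | [] => frames
  | x :: xs =>
    let k := decide (x ≥ sync_threshold)
    let run := x :: xs.takeWhile (fun y => decide (y ≥ sync_threshold) == k)
    let rest := xs.dropWhile (fun y => decide (y ≥ sync_threshold) == k)
    if k then
      split_frames_altAux sync_threshold rest (run.getLastD 0) frames
    else
      split_frames_altAux sync_threshold rest last_sync
        (if run.length ≥ 6 then frames ++ [(last_sync, run)] else frames)
termination_by ps.length
decreasing_by
  all_goals
    simp only [List.length_cons]
    have := List.length_dropWhile_le (fun y => decide (y ≥ sync_threshold) == decide (x ≥ sync_threshold)) xs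
    omega

def split_frames_alt (pulses : List Int) (sync_threshold : Int) : List (Int × List Int) :=
  split_frames_altAux sync_threshold pulses 0 []

-- ===== PRECONDITION & SPEC =====
def Spec_split_frames (pulses : List Int) (sync_threshold : Int) (out : List (Int × List Int)) : Prop := out = split_frames_alt pulses sync_threshold
instance (pulses : List Int) (sync_threshold : Int) (out : List (Int × List Int)) : Decidable (Spec_split_frames pulses sync_threshold out) := by unfold Spec_split_frames; infer_instance

-- ===== CLAIM (what is proved, stated in full; the proofs are below) =====
def Claim_equal_split_frames : Prop := ∀ (pulses : List Int) (sync_threshold : Int), Dom_split_frames pulses sync_threshold → Spec_split_frames pulses sync_threshold (split_frames pulses sync_threshold)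

-- ===== LEMMAS AND PROOFS =====

-- the final flush of A, as a function of the loop state
def pvFinishA (st : List (Int × List Int) × List Int × Int) : List (Int × List Int) :=
  if st.2.1.length ≥ 6 then st.1 ++ [(st.2.2, st.2.1)] else st.1

-- B on a list made entirely of data pulses: one run, flushed iff long enough
theorem altAux_all_data (thr : Int) (cur : List Int) (ls : Int) (fr : List (Int × List Int))
    (h : ∀ x ∈ cur, ¬ x ≥ thr) :
    split_frames_altAux thr cur ls fr
      = if cur.length ≥ 6 then fr ++ [(ls, cur)] else fr := by
  cases cur with
  | nil => simp [split_frames_altAux]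
  | cons c cs =>
    have hc : decide (c ≥ thr) = false := by
      simp [h c (List.mem_cons_self)]
    have htw : cs.takeWhile (fun y => decide (y ≥ thr) == false) = cs := by
      apply List.takeWhile_eq_self_iff.mpr
      intro y hy
      simp [h y (List.mem_cons_of_mem _ hy)]
    have hdw : cs.dropWhile (fun y => decide (y ≥ thr) == false) = [] := by
      apply List.dropWhile_eq_nil_iff.mpr
      intro y hy
      simp [h y (List.mem_cons_of_mem _ hy)]
    simp only [split_frames_altAux, hc, Bool.false_eq_true, if_false]
    rw [htw, hdw]
    split <;> simp [split_frames_altAux]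

-- a leading sync pulse just updates last_sync
theorem altAux_sync_shift (thr p : Int) (ps : List Int) (ls : Int) (fr : List (Int × List Int))
    (hp : p ≥ thr) :
    split_frames_altAux thr (p :: ps) ls fr = split_frames_altAux thr ps p fr := by
  have hp' : decide (p ≥ thr) = true := by simpa using hp
  cases ps with
  | nil => simp [split_frames_altAux, hp']
  | cons q qs =>
    by_cases hq : q ≥ thr
    · have hq' : decide (q ≥ thr) = true := by simpa using hq
      simp [split_frames_altAux, hp', hq']
    · have hq' : decide (q ≥ thr) = false := by simpa using hq
      simp [split_frames_altAux, hp', hq']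

-- a data prefix followed by a sync pulse: the prefix is B's first run
theorem altAux_data_then_sync (thr p : Int) (cur ps : List Int) (ls : Int)
    (fr : List (Int × List Int)) (h : ∀ x ∈ cur, ¬ x ≥ thr) (hp : p ≥ thr) :
    split_frames_altAux thr (cur ++ p :: ps) ls fr
      = split_frames_altAux thr ps p
          (if cur.length ≥ 6 then fr ++ [(ls, cur)] else fr) := by
  have hp' : decide (p ≥ thr) = true := by simpa using hp
  cases cur with
  | nil =>
    simpa using altAux_sync_shift thr p ps ls fr hp
  | cons c cs =>
    have hc : decide (c ≥ thr) = false := by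
      simp [h c (List.mem_cons_self)]
    have hall : ∀ y ∈ cs, (fun y => decide (y ≥ thr) == false) y = true := by
      intro y hy
      simp [h y (List.mem_cons_of_mem _ hy)]
    have htw : (cs ++ p :: ps).takeWhile (fun y => decide (y ≥ thr) == false) = cs := by
      rw [List.takeWhile_append_of_pos hall]
      simp [hp']
    have hdw : (cs ++ p :: ps).dropWhile (fun y => decide (y ≥ thr) == false) = p :: ps := by
      rw [List.dropWhile_append_of_pos hall]
      simp [hp']
    simp only [List.cons_append, split_frames_altAux, hc, Bool.false_eq_true, if_false]
    rw [htw, hdw]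
    rw [altAux_sync_shift thr p ps ls _ hp]

-- main invariant: A's remaining loop (+ flush) from state (fr, cur, ls) equals B on cur ++ ps
theorem main_inv (thr : Int) (ps : List Int) :
    ∀ (cur : List Int) (ls : Int) (fr : List (Int × List Int)),
      (∀ x ∈ cur, ¬ x ≥ thr) →
      pvFinishA (ps.foldl (split_frames_stepA thr) (fr, cur, ls))
        = split_frames_altAux thr (cur ++ ps) ls fr := by
  induction ps with
  | nil =>
    intro cur ls fr h
    simp only [List.foldl_nil, List.append_nil, pvFinishA]
    rw [altAux_all_data thr cur ls fr h]
  | cons p ps ih =>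
    intro cur ls fr h
    by_cases hp : p ≥ thr
    · have hstep : split_frames_stepA thr (fr, cur, ls) p
          = ((if cur.length ≥ 6 then fr ++ [(ls, cur)] else fr), [], p) := by
        simp [split_frames_stepA, hp]
      rw [List.foldl_cons, hstep,
        ih [] p _ (by intro x hx; simp at hx),
        altAux_data_then_sync thr p cur ps ls fr h hp]
      simp
    · have hstep : split_frames_stepA thr (fr, cur, ls) p = (fr, cur ++ [p], ls) := by
        simp [split_frames_stepA, hp]
      have h' : ∀ x ∈ cur ++ [p], ¬ x ≥ thr := by
        intro x hx
        rcases List.mem_append.mp hx with hx | hx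
        · exact h x hx
        · simp at hx; subst hx; exact hp
      rw [List.foldl_cons, hstep, ih (cur ++ [p]) ls fr h']
      simp

-- ===== VERDICT (by name: the statement is the Claim_ definition above) =====
theorem split_frames_spec : Claim_equal_split_frames := by
  intro pulses thr _
  unfold Spec_split_frames split_frames split_frames_alt
  have := main_inv thr pulses [] 0 [] (by intro x hx; simp at hx)
  simpa [pvFinishA] using this
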